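-- pv_equiv track=rewrite | github.com/pypi-data/pypi-mirror-403 | packages/gpt-researcher-tomorrow/gpt_researcher_tomorrow-0.2.1-py3-none-any.whl/gpt_researcher/skills/deep_research.py | trim_context_to_word_limit
-- ===== SOURCE A (Python) =====
-- from typing import List, Dict, Any, Optional, Set
--
-- MAX_CONTEXT_WORDS = 25000
--
-- def count_words(text: str) -> int:
--     """Count words in a text string"""
--     return len(text.split())
--
-- def trim_context_to_word_limit(context_list: List[str], max_words: int = MAX_CONTEXT_WORDS) -> List[str]:
--     """Trim context list to stay within word limit while preserving most recent/relevant items"""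
--     total_words = 0
--     trimmed_context = []
--
--     # Process in reverse to keep most recent items
--     for item in reversed(context_list):
--         words = count_words(item)
--         if total_words + words <= max_words:
--             trimmed_context.insert(0, item)  # Insert at start to maintain original order
--             total_words += words
--         else:
--             break
--
--     return trimmed_context
-- ===== SOURCE B (Python) =====
-- MAX_CONTEXT_WORDS = 25000
--
-- def count_words(text: str) -> int:
--     """Count words in a text string"""
--     return len(text.split())
--
-- def trim_context_to_word_limit(context_list, max_words=MAX_CONTEXT_WORDS):
--     """Two-pass version: tabulate word counts, then scan the counts table
--     backward to find the start of the longest fitting suffix, and slice once."""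
--     counts = [count_words(item) for item in context_list]
--     total = 0
--     start = len(context_list)
--     for i in range(len(context_list) - 1, -1, -1):
--         if total + counts[i] > max_words:
--             break
--         total += counts[i]
--         start = i
--     return context_list[start:]
-- ===== Notes on version B (the rewrite author's own statement) =====
-- stated objective: faster
-- what changed: B separates the work into two passes -- first a map producing a word-count table, then a backward index scan over that table to find the cutoff index -- and returns a single slice, instead of A's interleaved reverse loop that counts and builds the result by repeated insert(0, item).
import Mathlib
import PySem

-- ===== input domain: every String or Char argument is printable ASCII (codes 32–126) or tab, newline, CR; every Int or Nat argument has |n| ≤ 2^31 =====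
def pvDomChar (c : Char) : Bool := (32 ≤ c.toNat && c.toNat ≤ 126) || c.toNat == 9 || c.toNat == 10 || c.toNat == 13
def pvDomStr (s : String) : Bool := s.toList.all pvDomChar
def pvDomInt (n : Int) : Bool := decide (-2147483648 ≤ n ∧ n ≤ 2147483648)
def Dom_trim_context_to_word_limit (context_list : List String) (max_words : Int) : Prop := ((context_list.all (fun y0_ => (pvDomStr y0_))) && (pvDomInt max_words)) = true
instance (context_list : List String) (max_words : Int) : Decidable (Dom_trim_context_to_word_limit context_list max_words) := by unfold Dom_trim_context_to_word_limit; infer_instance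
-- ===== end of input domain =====

-- B recomputes A's result with a two-pass table-and-slice decomposition instead of A's
-- interleaved reverse loop with quadratic insert(0, ...); return values proved identical (objective: faster).

-- ===== PORT A =====
-- count_words(text) = len(text.split())
def count_words (text : String) : Int := ((PySem.Str.split₀ text).length : Int)

-- A's loop over reversed(context_list): state (total_words, trimmed_context); break = return acc.
-- trimmed_context.insert(0, item) = item :: acc.
def trimA_loop (max_words : Int) : List String → Int → List String → List String
  | [], _, acc => acc
  | item :: rest, total, acc =>
      let words := count_words item
      if total + words ≤ max_words then trimA_loop max_words rest (total + words) (item :: acc)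
      else acc

def trim_context_to_word_limit (context_list : List String) (max_words : Int) : List String :=
  trimA_loop max_words context_list.reverse 0 []

-- ===== PORT B =====
-- B's backward index loop over the counts table: i counts down from len-1 to 0; break returns start.
def trimB_loop (counts : List Int) (max_words : Int) : Nat → Int → Nat → Nat
  | 0, _, start => start
  | i + 1, total, start =>
      let c := counts.getD i 0
      if total + c > max_words then start
      else trimB_loop counts max_words i (total + c) i

-- context_list[start:] with 0 ≤ start ≤ len is exactly List.drop start.
def trim_context_to_word_limit_alt (context_list : List String) (max_words : Int) : List String :=
  let counts := context_list.map count_words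
  let start := trimB_loop counts max_words context_list.length 0 context_list.length
  context_list.drop start

-- ===== PRECONDITION & SPEC =====
def Spec_trim_context_to_word_limit (context_list : List String) (max_words : Int) (out : List String) : Prop := out = trim_context_to_word_limit_alt context_list max_words
instance (context_list : List String) (max_words : Int) (out : List String) : Decidable (Spec_trim_context_to_word_limit context_list max_words out) := by unfold Spec_trim_context_to_word_limit; infer_instance

-- ===== CLAIM (what is proved, stated in full; the proofs are below) =====
def Claim_equal_trim_context_to_word_limit : Prop := ∀ (context_list : List String) (max_words : Int), Dom_trim_context_to_word_limit context_list max_words → Spec_trim_context_to_word_limit context_list max_words (trim_context_to_word_limit context_list max_words)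

-- ===== LEMMAS AND PROOFS =====

-- trimB_loop only reads indices below its fuel, so trailing table entries are irrelevant.
lemma trimB_loop_append (counts : List Int) (c : Int) (m : Int) :
    ∀ (i : Nat), i ≤ counts.length → ∀ (total : Int) (start : Nat),
      trimB_loop (counts ++ [c]) m i total start = trimB_loop counts m i total start := by
  intro i
  induction i with
  | zero => intro _ total start; simp [trimB_loop]
  | succ i ih =>
      intro hi total start
      have hlt : i < counts.length := hi
      simp only [trimB_loop, List.getD, List.getElem?_append_left hlt]
      split
      · rfl
      · exact ih (Nat.le_of_lt hlt) _ _

-- the result of trimB_loop never exceeds its start argument (when fuel ≤ start).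
lemma trimB_loop_le (counts : List Int) (m : Int) :
    ∀ (i : Nat) (total : Int) (start : Nat), i ≤ start →
      trimB_loop counts m i total start ≤ start := by
  intro i
  induction i with
  | zero => intro total start _; simp [trimB_loop]
  | succ i ih =>
      intro total start h
      simp only [trimB_loop]
      split
      · exact Nat.le_refl _
      · exact Nat.le_trans (ih _ _ (Nat.le_refl i)) (Nat.le_of_succ_le h)

-- main invariant, by snoc induction: A's reverse loop equals drop at B's cutoff, appended to acc.
lemma trim_main (m : Int) :
    ∀ (l : List String) (total : Int) (acc : List String),
      trimA_loop m l.reverse total acc =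
        l.drop (trimB_loop (l.map count_words) m l.length total l.length) ++ acc := by
  intro l
  induction l using List.reverseRecOn with
  | nil => intro total acc; simp [trimA_loop, trimB_loop]
  | append_singleton xs x ih =>
      intro total acc
      have hlen : (xs ++ [x]).length = xs.length + 1 := by simp
      rw [List.reverse_append]
      simp only [List.reverse_cons, List.reverse_nil, List.nil_append, List.cons_append,
        trimA_loop, hlen, List.map_append, List.map_cons, List.map_nil]
      have hget : (xs.map count_words ++ [count_words x]).getD xs.length 0 = count_words x := by
        simp [List.getD]
      simp only [trimB_loop, hget]
      by_cases h : total + count_words x ≤ m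
      · rw [if_pos h, if_neg (by omega)]
        rw [trimB_loop_append (xs.map count_words) _ m xs.length (by simp) _ _]
        rw [ih (total + count_words x) (x :: acc)]
        have hle := trimB_loop_le (xs.map count_words) m xs.length (total + count_words x)
          xs.length (Nat.le_refl _)
        rw [List.drop_append_of_le_length hle]
        simp
      · rw [if_neg h, if_pos (by omega)]
        simp

-- ===== VERDICT (by name: the statement is the Claim_ definition above) =====
theorem trim_context_to_word_limit_spec : Claim_equal_trim_context_to_word_limit := by
  intro context_list max_words _
  unfold Spec_trim_context_to_word_limit trim_context_to_word_limit trim_context_to_word_limit_alt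
  simpa using trim_main max_words context_list 0 []
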